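-- pv_equiv track=rewrite | github.com/DenzilGreenwood/CIAF_Model_Creation | ciaf/gates/implementations/bias_gate.py | _get_required_actions
-- ===== SOURCE A (Python) =====
-- from typing import Any, Dict, List, Optional, Set, Tuple
--
-- def _get_required_actions(violations: List[str]) -> List[str]:
--     """Get required actions based on violations."""
--     actions = []
--
--     if any("demographic_parity_violation" in v for v in violations):
--         actions.append("Document fairness violation in compliance log")
--         actions.append("Implement bias mitigation before deployment")
--
--     if any("representation_violation" in v for v in violations):
--         actions.append("Address data representation issues")
--
--     if any("equalized_odds_violation" in v for v in violations):
--         actions.append("Apply fairness post-processing techniques")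
--
--     return actions
-- ===== SOURCE B (Python) =====
-- from typing import Any, Dict, List, Optional, Set, Tuple
--
-- _KEYS = ["demographic_parity_violation",
--          "representation_violation",
--          "equalized_odds_violation"]
--
-- _ACTIONS = [["Document fairness violation in compliance log",
--              "Implement bias mitigation before deployment"],
--             ["Address data representation issues"],
--             ["Apply fairness post-processing techniques"]]
--
-- # Precomputed: action list for every possible match bitmask (bit i = key i matched).
-- _TABLE = [[a for i, acts in enumerate(_ACTIONS) if m >> i & 1 for a in acts]
--           for m in range(8)]
--
-- def _get_required_actions(violations: List[str]) -> List[str]: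
--     """Get required actions based on violations."""
--     mask = 0
--     for v in violations:
--         for i, key in enumerate(_KEYS):
--             if key in v:
--                 mask |= 1 << i
--         if mask == 7:
--             break
--     return list(_TABLE[mask])
-- ===== Notes on version B (the rewrite author's own statement) =====
-- stated objective: alternative
-- what changed: Replaces the three independent any()-substring scans with a single pass over the violations that accumulates a 3-bit match mask (with early exit once all bits are set) and then returns the precomputed action list indexed by that mask from an 8-entry lookup table.
import Mathlib
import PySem

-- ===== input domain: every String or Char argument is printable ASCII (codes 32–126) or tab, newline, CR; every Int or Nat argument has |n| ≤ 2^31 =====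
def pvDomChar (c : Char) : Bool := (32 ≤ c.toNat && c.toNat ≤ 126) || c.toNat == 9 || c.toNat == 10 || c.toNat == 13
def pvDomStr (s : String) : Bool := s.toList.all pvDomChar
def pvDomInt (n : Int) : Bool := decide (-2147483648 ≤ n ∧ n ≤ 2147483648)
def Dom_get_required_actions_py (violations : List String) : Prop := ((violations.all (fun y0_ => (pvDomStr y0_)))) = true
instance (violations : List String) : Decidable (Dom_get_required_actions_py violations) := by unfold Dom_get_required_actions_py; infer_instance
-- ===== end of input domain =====

-- B replaces A's three independent any()-substring scans by a single pass that accumulates a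
-- 3-bit match mask (early exit at full mask) and a precomputed 8-entry mask->actions lookup table
-- (alternative decomposition, same asymptotic cost).


-- ===== PORT A =====
def get_required_actions_py (violations : List String) : List String :=
  let actions : List String := []
  let actions := if violations.any (fun v => PySem.Str.isIn "demographic_parity_violation" v) then
      actions ++ ["Document fairness violation in compliance log"] ++ ["Implement bias mitigation before deployment"]
    else actions
  let actions := if violations.any (fun v => PySem.Str.isIn "representation_violation" v) then
      actions ++ ["Address data representation issues"]
    else actions
  let actions := if violations.any (fun v => PySem.Str.isIn "equalized_odds_violation" v) then
      actions ++ ["Apply fairness post-processing techniques"]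
    else actions
  actions

-- ===== PORT B =====
def pvKeys : List String :=
  ["demographic_parity_violation", "representation_violation", "equalized_odds_violation"]

def pvActions : List (List String) :=
  [["Document fairness violation in compliance log", "Implement bias mitigation before deployment"],
   ["Address data representation issues"],
   ["Apply fairness post-processing techniques"]]

-- _TABLE = [[a for i, acts in enumerate(_ACTIONS) if m >> i & 1 for a in acts] for m in range(8)]
-- (m ranges over 0..7 and enumerate indices are 0..2, so .toNat on them is exact)
def pvTable : List (List String) :=
  (PySem.List.pyRange 0 8 1).map (fun m =>
    (PySem.List.enumerate pvActions).foldl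
      (fun acc p => if (m >>> p.1.toNat) % 2 ≠ 0 then acc ++ p.2 else acc) [])

-- the for-loop over violations with the 'if mask == 7: break' early exit
def pvMaskLoop : List String → Int → Int
  | [], mask => mask
  | v :: rest, mask =>
    let mask' := (PySem.List.enumerate pvKeys).foldl
      (fun m p => if PySem.Str.isIn p.2 v then Int.lor m ((1 : Int) <<< p.1.toNat) else m) mask
    if mask' == 7 then mask' else pvMaskLoop rest mask'

def get_required_actions_py_alt (violations : List String) : List String :=
  -- the mask is always in [0, 8), so the lookup never falls back to the default
  PySem.List.pyGetD pvTable (pvMaskLoop violations 0) []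

-- ===== PRECONDITION & SPEC =====
def Spec_get_required_actions_py (violations : List String) (out : List String) : Prop := out = get_required_actions_py_alt violations
instance (violations : List String) (out : List String) : Decidable (Spec_get_required_actions_py violations out) := by unfold Spec_get_required_actions_py; infer_instance

-- ===== CLAIM (what is proved, stated in full; the proofs are below) =====
def Claim_equal_get_required_actions_py : Prop := ∀ (violations : List String), Dom_get_required_actions_py violations → Spec_get_required_actions_py violations (get_required_actions_py violations)

-- ===== LEMMAS AND PROOFS =====

def pvMaskOf (b1 b2 b3 : Bool) : Int :=
  Int.lor (Int.lor (if b1 then 1 else 0) (if b2 then 2 else 0)) (if b3 then 4 else 0)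

lemma pv_step (v : String) (b1 b2 b3 : Bool) :
    (PySem.List.enumerate pvKeys).foldl
      (fun m p => if PySem.Str.isIn p.2 v then Int.lor m ((1 : Int) <<< p.1.toNat) else m)
      (pvMaskOf b1 b2 b3)
    = pvMaskOf (b1 || PySem.Str.isIn "demographic_parity_violation" v)
               (b2 || PySem.Str.isIn "representation_violation" v)
               (b3 || PySem.Str.isIn "equalized_odds_violation" v) := by
  simp only [pvKeys, PySem.List.enumerate, List.foldl_cons, List.foldl_nil]
  cases h1 : PySem.Str.isIn "demographic_parity_violation" v <;>
  cases h2 : PySem.Str.isIn "representation_violation" v <;>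
  cases h3 : PySem.Str.isIn "equalized_odds_violation" v <;>
  cases b1 <;> cases b2 <;> cases b3 <;>
    simp [h1, h2, h3, pvMaskOf] <;> decide

lemma pvMaskOf_eq_seven (b1 b2 b3 : Bool) :
    (pvMaskOf b1 b2 b3 == 7) = (b1 && b2 && b3) := by
  cases b1 <;> cases b2 <;> cases b3 <;> decide

lemma pv_loop (vs : List String) (b1 b2 b3 : Bool) :
    pvMaskLoop vs (pvMaskOf b1 b2 b3)
    = pvMaskOf (b1 || vs.any (fun v => PySem.Str.isIn "demographic_parity_violation" v))
               (b2 || vs.any (fun v => PySem.Str.isIn "representation_violation" v))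
               (b3 || vs.any (fun v => PySem.Str.isIn "equalized_odds_violation" v)) := by
  induction vs generalizing b1 b2 b3 with
  | nil => simp [pvMaskLoop]
  | cons v t ih =>
    simp only [pvMaskLoop, pv_step, List.any_cons, ← Bool.or_assoc, pvMaskOf_eq_seven]
    cases hx : (b1 || PySem.Str.isIn "demographic_parity_violation" v) <;>
    cases hy : (b2 || PySem.Str.isIn "representation_violation" v) <;>
    cases hz : (b3 || PySem.Str.isIn "equalized_odds_violation" v) <;>
      simp [ih]

-- ===== VERDICT (by name: the statement is the Claim_ definition above) =====
theorem get_required_actions_py_spec : Claim_equal_get_required_actions_py := by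
  intro violations _
  unfold Spec_get_required_actions_py get_required_actions_py get_required_actions_py_alt
  rw [show (0 : Int) = pvMaskOf false false false from rfl, pv_loop]
  cases h1 : violations.any (fun v => PySem.Str.isIn "demographic_parity_violation" v) <;>
  cases h2 : violations.any (fun v => PySem.Str.isIn "representation_violation" v) <;>
  cases h3 : violations.any (fun v => PySem.Str.isIn "equalized_odds_violation" v) <;>
    · simp only [h1, h2, h3, Bool.false_or, if_true, if_false]
      decide
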